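-- pv_equiv track=rewrite | github.com/Bitl/CIS256_Full_Name_EX4 | guess_the_word.py | check_guess_letter_exists
-- ===== SOURCE A (Python) =====
-- def word_has_letter(suggested_letter, word):
--     for letter in word:
--         if letter == suggested_letter:
--             return True
--
--     return False
--
-- def index_exists(indexes_guessed, index):
--     for cur_index in indexes_guessed:
--         if cur_index == index:
--             return True
--
--     return False
--
-- def check_guess_letter_exists(indexes_guessed, suggested_letter, word):
--     if word_has_letter(suggested_letter, word):
--         # Initalize the index variable with an invalid index.
--         cur_index = -1
--         for letter in word:
--             # Increment index
--             cur_index += 1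
--             if letter == suggested_letter:
--                 # Check if the letter exists.
--                 if index_exists(indexes_guessed, cur_index):
--                     return True
--
--     return False
-- ===== SOURCE B (Python) =====
-- def check_guess_letter_exists(indexes_guessed, suggested_letter, word):
--     for idx in indexes_guessed:
--         if 0 <= idx < len(word) and word[idx] == suggested_letter:
--             return True
--     return False
-- ===== Notes on version B (the rewrite author's own statement) =====
-- stated objective: simpler
-- what changed: Instead of pre-scanning the word and, for each matching letter, re-scanning the guessed-index list, B makes a single pass over the guessed indexes and checks each by direct positional lookup into the word.
import Mathlib
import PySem

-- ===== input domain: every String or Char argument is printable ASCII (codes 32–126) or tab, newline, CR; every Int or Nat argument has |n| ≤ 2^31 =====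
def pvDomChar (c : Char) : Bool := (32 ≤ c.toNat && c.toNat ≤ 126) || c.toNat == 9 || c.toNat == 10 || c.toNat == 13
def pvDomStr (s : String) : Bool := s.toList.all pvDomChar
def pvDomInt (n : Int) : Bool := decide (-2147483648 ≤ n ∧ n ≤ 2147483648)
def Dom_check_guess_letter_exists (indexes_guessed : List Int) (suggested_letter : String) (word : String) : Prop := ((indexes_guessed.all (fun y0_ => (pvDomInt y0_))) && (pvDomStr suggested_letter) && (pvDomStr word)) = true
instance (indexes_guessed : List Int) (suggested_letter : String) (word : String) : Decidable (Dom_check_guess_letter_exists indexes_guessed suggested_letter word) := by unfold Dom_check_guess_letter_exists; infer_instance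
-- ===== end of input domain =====

-- B drops A's word pre-scan and nested per-letter index re-scan: it makes a single pass
-- over indexes_guessed with a direct positional lookup into the word (objective: simpler).

-- ===== PORT A =====
-- 'for letter in word: if letter == suggested_letter: return True / return False'
def pvWordHasLetterLoop (suggested_letter : String) : List Char → Bool
  | [] => false
  | c :: rest =>
    if String.singleton c == suggested_letter then true
    else pvWordHasLetterLoop suggested_letter rest

def word_has_letter (suggested_letter : String) (word : String) : Bool :=
  pvWordHasLetterLoop suggested_letter word.toList

-- 'for cur_index in indexes_guessed: if cur_index == index: return True / return False'
def index_exists (indexes_guessed : List Int) (index : Int) : Bool :=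
  match indexes_guessed with
  | [] => false
  | i :: rest => if i == index then true else index_exists rest index

-- the main loop of A: cur_index starts at -1 and is incremented before each letter check
def pvCheckLoopA (indexes_guessed : List Int) (suggested_letter : String) :
    List Char → Int → Bool
  | [], _ => false
  | c :: rest, cur_index =>
    let cur_index' := cur_index + 1
    if String.singleton c == suggested_letter then
      if index_exists indexes_guessed cur_index' then true
      else pvCheckLoopA indexes_guessed suggested_letter rest cur_index'
    else pvCheckLoopA indexes_guessed suggested_letter rest cur_index'

def check_guess_letter_exists (indexes_guessed : List Int) (suggested_letter : String) (word : String) : Bool :=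
  if word_has_letter suggested_letter word then
    pvCheckLoopA indexes_guessed suggested_letter word.toList (-1)
  else false

-- ===== PORT B =====
-- 'for idx in indexes_guessed: if 0 <= idx < len(word) and word[idx] == suggested_letter: return True / return False'
-- word[idx] is only evaluated under the bounds guard, so getD's default is never used.
def pvCheckLoopB (suggested_letter : String) (word : String) : List Int → Bool
  | [] => false
  | idx :: rest =>
    if decide (0 ≤ idx) && decide (idx < (word.toList.length : Int))
        && (String.singleton (word.toList.getD idx.toNat ' ') == suggested_letter) then
      true
    else pvCheckLoopB suggested_letter word rest

def check_guess_letter_exists_alt (indexes_guessed : List Int) (suggested_letter : String) (word : String) : Bool :=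
  pvCheckLoopB suggested_letter word indexes_guessed

-- ===== PRECONDITION & SPEC =====
def Spec_check_guess_letter_exists (indexes_guessed : List Int) (suggested_letter : String) (word : String) (out : Bool) : Prop := out = check_guess_letter_exists_alt indexes_guessed suggested_letter word
instance (indexes_guessed : List Int) (suggested_letter : String) (word : String) (out : Bool) : Decidable (Spec_check_guess_letter_exists indexes_guessed suggested_letter word out) := by unfold Spec_check_guess_letter_exists; infer_instance

-- ===== CLAIM (what is proved, stated in full; the proofs are below) =====
def Claim_equal_check_guess_letter_exists : Prop := ∀ (indexes_guessed : List Int) (suggested_letter : String) (word : String), Dom_check_guess_letter_exists indexes_guessed suggested_letter word → Spec_check_guess_letter_exists indexes_guessed suggested_letter word (check_guess_letter_exists indexes_guessed suggested_letter word)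

-- ===== LEMMAS AND PROOFS =====

theorem index_exists_iff (ig : List Int) (idx : Int) :
    index_exists ig idx = true ↔ idx ∈ ig := by
  induction ig with
  | nil => simp [index_exists]
  | cons i rest ih =>
    simp only [index_exists, List.mem_cons]
    split_ifs with h
    · exact ⟨fun _ => Or.inl (beq_iff_eq.mp h).symm, fun _ => rfl⟩
    · rw [ih]
      constructor
      · exact Or.inr
      · rintro (rfl | hk)
        · exact absurd (beq_iff_eq.mpr rfl) h
        · exact hk

theorem whl_iff (s : String) (l : List Char) :
    pvWordHasLetterLoop s l = true ↔ ∃ c ∈ l, String.singleton c == s := by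
  induction l with
  | nil => simp [pvWordHasLetterLoop]
  | cons c rest ih =>
    simp only [pvWordHasLetterLoop, List.mem_cons]
    split_ifs with h
    · exact ⟨fun _ => ⟨c, Or.inl rfl, h⟩, fun _ => rfl⟩
    · rw [ih]
      constructor
      · rintro ⟨d, hd, hm⟩; exact ⟨d, Or.inr hd, hm⟩
      · rintro ⟨d, (rfl | hd), hm⟩
        · exact absurd hm h
        · exact ⟨d, hd, hm⟩

theorem checkLoopA_iff (ig : List Int) (s : String) (l : List Char) (i : Int) :
    pvCheckLoopA ig s l i = true ↔
      ∃ j : Nat, j < l.length ∧ String.singleton (l.getD j ' ') == s ∧ (i + 1 + j) ∈ ig := by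
  induction l generalizing i with
  | nil => simp [pvCheckLoopA]
  | cons c rest ih =>
    simp only [pvCheckLoopA]
    split_ifs with h1 h2
    · constructor
      · intro _
        exact ⟨0, by simp, by simpa using h1, by simpa using (index_exists_iff ig (i+1)).mp h2⟩
      · intro _; rfl
    · rw [ih]
      constructor
      · rintro ⟨j, hj, hm, hmem⟩
        exact ⟨j + 1, by simpa using hj, by simpa using hm, by
          have : i + 1 + 1 + (j : Int) = i + 1 + (j + 1 : Nat) := by push_cast; ring
          rwa [this] at hmem⟩
      · rintro ⟨j, hj, hm, hmem⟩
        match j with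
        | 0 =>
          exfalso
          apply (by simpa [index_exists_iff] using h2 : ¬ (i + 1) ∈ ig)
          simpa using hmem
        | j + 1 =>
          refine ⟨j, by simp only [List.length_cons] at hj; omega, by simpa using hm, ?_⟩
          have : i + 1 + 1 + (j : Int) = i + 1 + (j + 1 : Nat) := by push_cast; ring
          rw [this]; exact hmem
    · rw [ih]
      constructor
      · rintro ⟨j, hj, hm, hmem⟩
        exact ⟨j + 1, by simpa using hj, by simpa using hm, by
          have : i + 1 + 1 + (j : Int) = i + 1 + (j + 1 : Nat) := by push_cast; ring
          rwa [this] at hmem⟩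
      · rintro ⟨j, hj, hm, hmem⟩
        match j with
        | 0 => exact absurd (by simpa using hm) h1
        | j + 1 =>
          refine ⟨j, by simp only [List.length_cons] at hj; omega, by simpa using hm, ?_⟩
          have : i + 1 + 1 + (j : Int) = i + 1 + (j + 1 : Nat) := by push_cast; ring
          rw [this]; exact hmem

theorem checkLoopB_iff (s : String) (w : String) (ig : List Int) :
    pvCheckLoopB s w ig = true ↔
      ∃ idx ∈ ig, 0 ≤ idx ∧ idx < (w.toList.length : Int) ∧
        String.singleton (w.toList.getD idx.toNat ' ') == s := by
  induction ig with
  | nil => simp [pvCheckLoopB]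
  | cons idx rest ih =>
    simp only [pvCheckLoopB, List.mem_cons]
    split_ifs with h
    · simp only [Bool.and_eq_true, decide_eq_true_eq] at h
      constructor
      · intro _; exact ⟨idx, Or.inl rfl, h.1.1, h.1.2, h.2⟩
      · intro _; rfl
    · simp only [Bool.and_eq_true, decide_eq_true_eq, not_and] at h
      rw [ih]
      constructor
      · rintro ⟨k, hk, h0, hl, hm⟩
        exact ⟨k, Or.inr hk, h0, hl, hm⟩
      · rintro ⟨k, (rfl | hk), h0, hl, hm⟩
        · exact absurd hm (by simp_all)
        · exact ⟨k, hk, h0, hl, hm⟩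

-- ===== VERDICT (by name: the statement is the Claim_ definition above) =====
theorem check_guess_letter_exists_spec : Claim_equal_check_guess_letter_exists := by
  intro ig s w _
  unfold Spec_check_guess_letter_exists
  rw [Bool.eq_iff_iff]
  unfold check_guess_letter_exists check_guess_letter_exists_alt
  rw [checkLoopB_iff]
  constructor
  · intro hA
    split_ifs at hA with hg
    · rcases (checkLoopA_iff ig s w.toList (-1)).mp hA with ⟨j, hj, hm, hmem⟩
      have hidx : (-1 : Int) + 1 + j = (j : Int) := by ring
      rw [hidx] at hmem
      exact ⟨(j : Int), hmem, by positivity, by exact_mod_cast hj, by simpa using hm⟩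
  · rintro ⟨idx, hmem, h0, hl, hm⟩
    have hj : idx.toNat < w.toList.length := by omega
    have hg : word_has_letter s w = true := by
      rw [word_has_letter, whl_iff]
      have he : w.toList.getD idx.toNat ' ' = w.toList[idx.toNat]'hj := by
        simp [List.getD_eq_getElem?_getD, List.getElem?_eq_getElem hj]
      exact ⟨w.toList.getD idx.toNat ' ', he ▸ List.getElem_mem hj, hm⟩
    rw [if_pos hg, checkLoopA_iff]
    refine ⟨idx.toNat, hj, hm, ?_⟩
    have : (-1 : Int) + 1 + idx.toNat = idx := by omega
    rwa [this]
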